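-- pv_equiv track=rewrite | github.com/kruStrip/Fundamentals-of-algorithmization-and-programming | Exponential.py | brute_force_sort
-- ===== SOURCE A (Python) =====
-- import itertools
--
-- def brute_force_sort(arr):
--
--     T = 0
--
--     for perm in itertools.permutations(arr):
--         T += 1
--         if list(perm) == sorted(arr):
--             T += 2
--             return list(perm), T
--         T += 1
--     T += 1
--     return arr, T
-- ===== SOURCE B (Python) =====
-- def brute_force_sort(arr):
--     # Rank of the first index-permutation (in itertools lex order) whose values
--     # are sorted, computed via the factorial number system; T = 2*rank + 3.
--     s = sorted(arr)
--     rest = list(arr)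
--     rank = 0
--     for v in s:
--         i = rest.index(v)
--         f = 1
--         for k in range(1, len(rest)):
--             f *= k
--         rank += i * f
--         rest.pop(i)
--     return s, 2 * rank + 3
-- ===== Notes on version B (the rewrite author's own statement) =====
-- stated objective: faster
-- what changed: B replaces A's linear scan of all n! permutations by computing the factorial-number-system rank of the first sorted permutation (first index of each sorted value, times factorial of the remaining length), so T = 2*rank + 3 without enumerating permutations; intended as faster (a timing run saw A time out at n=16 while B returned, so no ratio at the largest size could be measured).
import Mathlib
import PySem

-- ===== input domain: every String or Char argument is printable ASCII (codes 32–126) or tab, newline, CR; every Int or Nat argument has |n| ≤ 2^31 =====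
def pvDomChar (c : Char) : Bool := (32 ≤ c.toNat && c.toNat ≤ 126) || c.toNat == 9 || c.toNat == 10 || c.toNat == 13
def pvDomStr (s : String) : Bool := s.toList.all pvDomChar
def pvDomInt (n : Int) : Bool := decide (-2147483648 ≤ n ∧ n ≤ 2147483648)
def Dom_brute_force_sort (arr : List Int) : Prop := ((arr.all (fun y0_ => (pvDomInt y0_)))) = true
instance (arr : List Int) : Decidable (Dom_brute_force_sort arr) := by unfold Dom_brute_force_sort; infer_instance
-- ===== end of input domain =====

-- B replaces A's scan of itertools.permutations by a factorial-number-system rank computation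
-- of the first sorted permutation; intended as faster (a timing run saw A time out at n=16
-- while B returned, so no ratio could be measured).

-- ===== PORT A =====
-- the 'for perm in itertools.permutations(arr)' loop with counter T and early return
def pvGoA (arr sortedA : List Int) : List (List Int) → Int → List Int × Int
  | [], T => (arr, T + 1)
  | p :: rest, T => if p = sortedA then (p, T + 1 + 2) else pvGoA arr sortedA rest (T + 1 + 1)

def brute_force_sort (arr : List Int) : List Int × Int :=
  pvGoA arr (PySem.List.sorted arr (fun x => x) false) (PySem.List.permutations arr arr.length) 0

-- ===== PORT B =====
-- f = 1; for k in range(1, len(rest)): f *= k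
def pvFactLoop (n : Nat) : Int :=
  (PySem.List.pyRange 1 (n : Int) 1).foldl (fun f k => f * k) 1

-- for v in s: i = rest.index(v); f = …; rank += i * f; rest.pop(i)
-- rest.index(v) never raises on reachable calls (s stays a permutation of rest),
-- so List.idxOf, its total form, is exact here.
def pvRankLoop : List Int → List Int → Int → Int
  | [], _, rank => rank
  | v :: s', rest, rank =>
      let i : Nat := List.idxOf v rest
      pvRankLoop s' (rest.eraseIdx i) (rank + (i : Int) * pvFactLoop rest.length)

def brute_force_sort_alt (arr : List Int) : List Int × Int :=
  let s := PySem.List.sorted arr (fun x => x) false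
  (s, 2 * pvRankLoop s arr 0 + 3)

-- ===== PRECONDITION & SPEC =====
def Spec_brute_force_sort (arr : List Int) (out : List Int × Int) : Prop := out = brute_force_sort_alt arr
instance (arr : List Int) (out : List Int × Int) : Decidable (Spec_brute_force_sort arr out) := by unfold Spec_brute_force_sort; infer_instance

-- ===== CLAIM (what is proved, stated in full; the proofs are below) =====
def Claim_equal_brute_force_sort : Prop := ∀ (arr : List Int), Dom_brute_force_sort arr → Spec_brute_force_sort arr (brute_force_sort arr)

-- ===== LEMMAS AND PROOFS =====

-- rank, in factorial base, of the first index-permutation of `rest` realising `s` (proof-side spec)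
def pvRIdx : List Int → List Int → Nat
  | _, [] => 0
  | rest, v :: s' =>
      List.idxOf v rest * Nat.factorial (rest.length - 1) +
        pvRIdx (rest.eraseIdx (List.idxOf v rest)) s'

-- minimality of idxOf
theorem pvIdxOf_min (l : List Int) (v : Int) (i : Nat) (hi : i < l.length)
    (hlt : i < List.idxOf v l) : l[i] ≠ v := by
  induction l generalizing i with
  | nil => simp at hi
  | cons x t ih =>
      cases i with
      | zero =>
          intro he
          subst he
          simp at hlt
      | succ j =>
          by_cases hx : x = v
          · subst hx; simp at hlt
          · have : List.idxOf v (x :: t) = List.idxOf v t + 1 := by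
              simp [hx]
            rw [this] at hlt
            simpa using ih j (by simpa using hi) (by omega)


theorem pvPermsSucc (xs : List Int) (r : Nat) : PySem.List.permutations xs (r+1) =
    (List.range xs.length).flatMap (fun i =>
      if h : i < xs.length
      then (PySem.List.permutations (xs.eraseIdx i) r).map (fun p => xs[i] :: p)
      else []) := by
  rw [PySem.List.permutations]
  congr 1
  funext i
  by_cases hi : i < xs.length
  · simp [hi]
  · simp [hi]

theorem pvPermsLen : ∀ (n : Nat) (xs : List Int), xs.length = n →
    (PySem.List.permutations xs n).length = n.factorial := by
  intro n
  induction n with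
  | zero => intro xs h; simp [PySem.List.permutations_zero, Nat.factorial]
  | succ n ih =>
      intro xs h
      rw [pvPermsSucc, List.length_flatMap]
      rw [List.map_congr_left (l := List.range xs.length)
        (g := fun _ => n.factorial) ?_]
      · rw [List.map_const', List.sum_replicate, smul_eq_mul, List.length_range, h,
          Nat.factorial_succ]
      · intro i hi
        have hixs : i < xs.length := List.mem_range.mp hi
        simp only [dif_pos hixs, List.length_map]
        exact ih _ (by rw [List.length_eraseIdx_of_lt hixs]; omega)

theorem pvPermErase {v : Int} {s' xs : List Int} (h : (v :: s').Perm xs) :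
    s'.Perm (xs.eraseIdx (List.idxOf v xs)) := by
  have hv : v ∈ xs := h.subset (List.mem_cons_self ..)
  rw [List.eraseIdx_idxOf_eq_erase]
  exact (h.trans (List.perm_cons_erase hv)).cons_inv

theorem pvMemPerms : ∀ (n : Nat) (xs s : List Int), xs.length = n → s.Perm xs →
    s ∈ PySem.List.permutations xs n := by
  intro n
  induction n with
  | zero =>
      intro xs s h hp
      have hs : s = [] := by
        have := hp.length_eq; rw [h] at this; exact List.length_eq_zero_iff.mp this
      subst hs
      simp [PySem.List.permutations_zero]
  | succ n ih =>
      intro xs s h hp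
      obtain ⟨v, s', rfl⟩ : ∃ v s', s = v :: s' := by
        cases s with
        | nil => exfalso; have := hp.length_eq; rw [h] at this; simp at this
        | cons v s' => exact ⟨v, s', rfl⟩
      have hv : v ∈ xs := hp.subset (List.mem_cons_self ..)
      have hglt : List.idxOf v xs < xs.length := List.idxOf_lt_length_iff.mpr hv
      have hget : xs[List.idxOf v xs] = v := List.getElem_idxOf hglt
      have hlen' : (xs.eraseIdx (List.idxOf v xs)).length = n := by
        rw [List.length_eraseIdx_of_lt hglt]; omega
      rw [pvPermsSucc]
      refine List.mem_flatMap.mpr ⟨List.idxOf v xs, List.mem_range.mpr hglt, ?_⟩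
      simp only [dif_pos hglt, hget]
      exact List.mem_map.mpr ⟨s', ih _ _ hlen' (pvPermErase hp), rfl⟩

theorem pvIdxOfConsMap (v : Int) (s' : List Int) :
    ∀ (l : List (List Int)), List.idxOf (v :: s') (l.map (fun p => v :: p)) = List.idxOf s' l := by
  intro l
  induction l with
  | nil => rfl
  | cons q t ih =>
      by_cases hq : q = s'
      · subst hq; simp
      · have h1 : ¬ (v :: q = v :: s') := by simp [hq]
        simp [hq, h1, ih]

theorem pvIdxOfPerms : ∀ (n : Nat) (xs s : List Int), xs.length = n → s.Perm xs →
    List.idxOf s (PySem.List.permutations xs n) = pvRIdx xs s := by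
  intro n
  induction n with
  | zero =>
      intro xs s h hp
      have hs : s = [] := by
        have := hp.length_eq; rw [h] at this; exact List.length_eq_zero_iff.mp this
      subst hs
      simp [PySem.List.permutations_zero, pvRIdx]
  | succ n ih =>
      intro xs s h hp
      obtain ⟨v, s', rfl⟩ : ∃ v s', s = v :: s' := by
        cases s with
        | nil => exfalso; have := hp.length_eq; rw [h] at this; simp at this
        | cons v s' => exact ⟨v, s', rfl⟩
      have hv : v ∈ xs := hp.subset (List.mem_cons_self ..)
      set g := List.idxOf v xs with hgdef
      have hglt : g < xs.length := List.idxOf_lt_length_iff.mpr hv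
      have hget : xs[g] = v := List.getElem_idxOf hglt
      have hs' : s'.Perm (xs.eraseIdx g) := pvPermErase hp
      have hlen' : (xs.eraseIdx g).length = n := by
        rw [List.length_eraseIdx_of_lt hglt]; omega
      rw [pvPermsSucc]
      set f : Nat → List (List Int) := fun i =>
        if h : i < xs.length
        then (PySem.List.permutations (xs.eraseIdx i) n).map (fun p => xs[i] :: p)
        else [] with hf
      have hsplit : List.range xs.length
          = List.range g ++ (List.range (xs.length - g)).map (fun j => g + j) := by
        conv_lhs => rw [show xs.length = g + (xs.length - g) from by omega, List.range_add]
      rw [hsplit, List.flatMap_append]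
      have hnot : (v :: s') ∉ (List.range g).flatMap f := by
        intro hmemc
        obtain ⟨i, hi, hin⟩ := List.mem_flatMap.mp hmemc
        have hig : i < g := List.mem_range.mp hi
        have hixs : i < xs.length := by omega
        simp only [hf, dif_pos hixs] at hin
        obtain ⟨p, _, hpe⟩ := List.mem_map.mp hin
        have hxv : xs[i] = v := by injection hpe
        exact pvIdxOf_min xs v i hixs hig hxv
      rw [List.idxOf_append, if_neg hnot]
      have hlen1 : ((List.range g).flatMap f).length = g * n.factorial := by
        rw [List.length_flatMap]
        rw [List.map_congr_left (l := List.range g) (g := fun _ => n.factorial) ?_]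
        · rw [List.map_const', List.sum_replicate, smul_eq_mul, List.length_range]
        · intro i hi
          have hixs : i < xs.length := by have := List.mem_range.mp hi; omega
          simp only [hf, dif_pos hixs, List.length_map]
          exact pvPermsLen n _ (by rw [List.length_eraseIdx_of_lt hixs]; omega)
      have hrange2 : (List.range (xs.length - g)).map (fun j => g + j)
          = g :: (List.range (xs.length - g - 1)).map (fun j => g + 1 + j) := by
        rw [show xs.length - g = (xs.length - g - 1) + 1 from by omega,
          List.range_succ_eq_map]
        simp only [List.map_cons, List.map_map, Nat.add_zero]
        congr 1
        apply List.map_congr_left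
        intro j _
        simp only [Function.comp]
        omega
      rw [hrange2, List.flatMap_cons]
      have hfg : f g = (PySem.List.permutations (xs.eraseIdx g) n).map (fun p => v :: p) := by
        simp only [hf, dif_pos hglt, hget]
      have hmemblock : (v :: s') ∈ f g := by
        rw [hfg]
        exact List.mem_map.mpr ⟨s', pvMemPerms n _ _ hlen' hs', rfl⟩
      rw [List.idxOf_append, if_pos hmemblock, hfg, pvIdxOfConsMap, ih _ _ hlen' hs']
      rw [pvRIdx, hlen1, show xs.length - 1 = n from by omega]
      simp only [← hgdef]
      omega

theorem pvGoAEq (arr s : List Int) :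
    ∀ (ps : List (List Int)) (T : Int), s ∈ ps →
      pvGoA arr s ps T = (s, T + 2 * (List.idxOf s ps : Nat) + 3) := by
  intro ps
  induction ps with
  | nil => intro T h; simp at h
  | cons p rest ih =>
      intro T h
      by_cases hp : p = s
      · subst hp
        simp [pvGoA]
        ring
      · have hm : s ∈ rest := by
          rcases List.mem_cons.mp h with he | hm
          · exact absurd he.symm hp
          · exact hm
        rw [pvGoA, if_neg hp, ih _ hm]
        have : List.idxOf s (p :: rest) = List.idxOf s rest + 1 := by
          simp [hp]
        rw [this]
        push_cast
        ring_nf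

theorem pvFactLoopEq : ∀ (n : Nat), pvFactLoop n = ((n - 1).factorial : Int) := by
  intro n
  induction n with
  | zero => rfl
  | succ n ih =>
      rcases Nat.eq_zero_or_pos n with h0 | hpos
      · subst h0; rfl
      · unfold pvFactLoop
        rw [show ((n + 1 : Nat) : Int) = (n : Int) + 1 from by push_cast; ring,
          PySem.List.pyRange_one_succ_right (by exact_mod_cast hpos), List.foldl_append]
        show pvFactLoop n * (n : Int) = _
        rw [ih]
        rw [show (n + 1 - 1 : Nat) = n from by omega]
        rw [show n.factorial = (n - 1).factorial * n from by
          cases n with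
          | zero => omega
          | succ m => simp [Nat.factorial_succ]; ring]
        push_cast
        ring_nf

theorem pvRankLoopEq : ∀ (s rest : List Int) (rank : Int), s.Perm rest →
    pvRankLoop s rest rank = rank + (pvRIdx rest s : Int) := by
  intro s
  induction s with
  | nil => intro rest rank _; simp [pvRankLoop, pvRIdx]
  | cons v s' ih =>
      intro rest rank h
      rw [pvRankLoop, pvRIdx]
      rw [ih _ _ (pvPermErase h), pvFactLoopEq]
      push_cast
      ring

-- ===== VERDICT (by name: the statement is the Claim_ definition above) =====
theorem brute_force_sort_spec : Claim_equal_brute_force_sort := by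
  intro arr _
  have hperm : (PySem.List.sorted arr (fun x => x) false).Perm arr :=
    PySem.List.sorted_perm arr (fun x => x) false
  have hmem := pvMemPerms arr.length arr _ rfl hperm
  unfold Spec_brute_force_sort brute_force_sort brute_force_sort_alt
  rw [pvGoAEq arr _ _ 0 hmem, pvIdxOfPerms arr.length arr _ rfl hperm]
  simp only [pvRankLoopEq _ arr 0 hperm]
  congr 1
  ring
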